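-- pv_equiv track=rewrite | github.com/mjavorka/adventofcode | day4/day4.py | read_words2
-- ===== SOURCE A (Python) =====
-- def read_words2(words):
--     used_combinations = list()
--     for word in words:
--         word = word.rstrip()
--         chars = list()
--         for char in word:
--             chars.append(char)
--         sorted_word = ''.join(sorted(chars))
--         if sorted_word not in used_combinations:
--             used_combinations.append(sorted_word)
--         else:
--             return False
--     return True
-- ===== SOURCE B (Python) =====
-- def read_words2(words):
--     sigs = [''.join(sorted(word.rstrip())) for word in words]
--     return len(sigs) == len(set(sigs))
-- ===== Notes on version B (the rewrite author's own statement) =====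
-- stated objective: simpler
-- what changed: B drops the incremental 'seen' list, its per-word membership scan and the early return: it builds the full list of sorted-char signatures once and decides uniqueness by a single cardinality comparison len(sigs) == len(set(sigs)).
import Mathlib
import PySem

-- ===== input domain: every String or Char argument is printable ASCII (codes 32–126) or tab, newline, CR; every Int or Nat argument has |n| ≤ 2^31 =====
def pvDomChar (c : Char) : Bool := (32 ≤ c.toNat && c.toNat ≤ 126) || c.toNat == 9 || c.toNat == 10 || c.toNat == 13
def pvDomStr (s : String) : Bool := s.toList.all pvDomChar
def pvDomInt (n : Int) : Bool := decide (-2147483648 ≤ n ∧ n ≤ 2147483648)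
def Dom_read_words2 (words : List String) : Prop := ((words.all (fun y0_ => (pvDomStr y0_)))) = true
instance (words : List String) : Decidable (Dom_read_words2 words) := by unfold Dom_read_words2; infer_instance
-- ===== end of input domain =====

-- B replaces A's incremental 'seen' list, per-word membership scan and early return
-- by building all signatures once and comparing len(sigs) with len(set(sigs)) (simpler).

-- ===== PORT A =====
-- the loop body's signature: word.rstrip(), chars gathered by the inner append loop, ''.join(sorted(chars))
def read_words2_go (ws : List String) (used : List String) : Bool :=
  match ws with
  | [] => true
  | word :: rest =>
      let w := PySem.Str.rstrip word
      let chars := w.toList.foldl (fun acc c => acc ++ [c]) []   -- for char in word: chars.append(char)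
      let sorted_word := String.ofList (PySem.List.sorted chars (fun c => c) false)
      if sorted_word ∈ used then false
      else read_words2_go rest (used ++ [sorted_word])

def read_words2 (words : List String) : Bool := read_words2_go words []

-- ===== PORT B =====
def read_words2_sig (word : String) : String :=
  String.ofList (PySem.List.sorted (PySem.Str.rstrip word).toList (fun c => c) false)

def read_words2_alt (words : List String) : Bool :=
  let sigs := words.map read_words2_sig
  decide (sigs.length = (PySem.Set.ofList sigs).length)

-- ===== PRECONDITION & SPEC =====
def Spec_read_words2 (words : List String) (out : Bool) : Prop := out = read_words2_alt words
instance (words : List String) (out : Bool) : Decidable (Spec_read_words2 words out) := by unfold Spec_read_words2; infer_instance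

-- ===== CLAIM (what is proved, stated in full; the proofs are below) =====
def Claim_equal_read_words2 : Prop := ∀ (words : List String), Dom_read_words2 words → Spec_read_words2 words (read_words2 words)

-- ===== LEMMAS AND PROOFS =====

theorem foldl_append_id {α : Type} (l acc : List α) :
    l.foldl (fun a c => a ++ [c]) acc = acc ++ l := by
  induction l generalizing acc with
  | nil => simp
  | cons x xs ih => simp [List.foldl, ih]

theorem ofList_sublist (xs : List String) : (PySem.Set.ofList xs).Sublist xs := by
  induction xs with
  | nil => simp [PySem.Set.ofList_nil]
  | cons x xs ih =>
      rw [PySem.Set.ofList_cons]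
      refine List.Sublist.cons₂ x ?_
      exact List.Sublist.trans (by simp [PySem.Set.discard, List.filter_sublist]) ih

theorem len_eq_iff_nodup (xs : List String) :
    (xs.length = (PySem.Set.ofList xs).length) ↔ xs.Nodup := by
  constructor
  · intro h
    have := List.Sublist.eq_of_length (ofList_sublist xs) h.symm
    rw [← this]
    exact PySem.Set.nodup_ofList xs
  · intro h
    rw [PySem.Set.ofList_eq_self_of_nodup xs h]

theorem go_spec (ws used : List String) (h : used.Nodup) :
    read_words2_go ws used = decide ((used ++ ws.map read_words2_sig).Nodup) := by
  induction ws generalizing used with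
  | nil => simp [read_words2_go, h]
  | cons w rest ih =>
      rw [read_words2_go]
      simp only [foldl_append_id, List.nil_append]
      have hsig : String.ofList (PySem.List.sorted (PySem.Str.rstrip w).toList (fun c => c) false)
          = read_words2_sig w := rfl
      rw [hsig]
      by_cases hm : read_words2_sig w ∈ used
      · simp only [hm, if_true, List.map_cons]
        symm
        rw [decide_eq_false_iff_not]
        intro hn
        rw [List.nodup_append] at hn
        exact hn.2.2 _ hm _ (by simp) rfl
      · simp only [hm, if_false]
        have h' : (used ++ [read_words2_sig w]).Nodup := by
          refine List.nodup_append.mpr ⟨h, by simp, ?_⟩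
          intro a ha b hb
          simp only [List.mem_singleton] at hb
          subst hb
          exact fun e => hm (e ▸ ha)
        rw [ih (used ++ [read_words2_sig w]) h']
        simp

-- ===== VERDICT (by name: the statement is the Claim_ definition above) =====
theorem read_words2_spec : Claim_equal_read_words2 := by
  intro words _
  unfold Spec_read_words2 read_words2 read_words2_alt
  rw [go_spec words [] List.nodup_nil]
  simp only [List.nil_append]
  exact decide_eq_decide.mpr (len_eq_iff_nodup _).symm
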